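-- pv_equiv track=rewrite | github.com/arixwang/rounds | rounds.py | bracket_formula
-- ===== SOURCE A (Python) =====
-- def bracket_formula(entries: int, rounds):
--     """
--     Sorts the entries into brackets
--
--     Input:
--         - entries: the amount of entries
--         - rounds_int: the amount of rounds wanted
--
--     Output: List of lists of brackets
--     """
--     # Initializes list of brackets
--     brackets = []
--     for i in range(rounds):
--         brackets.append([])
--
--     # Initializes counters and bool
--     i = 0
--     bracket_index = 0
--     count_up = True
--
--     while i < entries:
--         i += 1
--         # Counting up
--         if count_up == True:
--             # Access bracket
--             current_bracket = brackets[bracket_index]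
--             # Append new entry to current bracket
--             current_bracket.append(i)
--             # Replace edited current bracket
--             brackets[bracket_index] = current_bracket
--             # Checks to see if counting down needs to start
--             if bracket_index == rounds - 1:
--                 count_up = False
--             bracket_index += 1
--         elif count_up == False:
--             # Subtract one from counting down
--             bracket_index -= 1
--             # Access bracket
--             current_bracket = brackets[bracket_index]
--             # Appens entry
--             current_bracket.append(i)
--             # Replace edited current bracket
--             brackets[bracket_index] = current_bracket
--             # Checks to see if counting down is needed
--             if bracket_index == 0:
--                 count_up = True
--     return brackets
-- ===== SOURCE B (Python) =====
-- def bracket_formula(entries: int, rounds):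
--     """
--     Sorts the entries into brackets (serpentine order with repeated endpoints),
--     computing each entry's bracket index in closed form.
--     """
--     brackets = [[] for _ in range(rounds)]
--     period = 2 * rounds
--     for i in range(1, entries + 1):
--         p = (i - 1) % period
--         idx = p if p < rounds else period - 1 - p
--         brackets[idx].append(i)
--     return brackets
-- ===== Notes on version B (the rewrite author's own statement) =====
-- stated objective: simpler
-- what changed: Replaced the count_up/count_down flag-and-increment state machine over a while loop with a single for loop that computes each entry's serpentine bracket index in closed form via p=(i-1)%(2*rounds), idx = p if p<rounds else 2*rounds-1-p.
import Mathlib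
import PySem

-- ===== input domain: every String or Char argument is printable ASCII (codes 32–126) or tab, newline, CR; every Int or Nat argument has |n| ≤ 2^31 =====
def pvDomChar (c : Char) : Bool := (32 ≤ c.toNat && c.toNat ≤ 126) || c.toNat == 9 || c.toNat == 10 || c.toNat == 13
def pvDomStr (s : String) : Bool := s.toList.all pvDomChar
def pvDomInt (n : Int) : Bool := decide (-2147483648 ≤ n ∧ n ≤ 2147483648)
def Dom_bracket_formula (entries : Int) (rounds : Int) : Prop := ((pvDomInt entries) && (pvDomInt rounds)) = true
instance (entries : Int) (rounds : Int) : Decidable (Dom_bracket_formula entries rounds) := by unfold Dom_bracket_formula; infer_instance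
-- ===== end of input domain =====

-- B replaces A's count-up/count-down state machine by a closed-form serpentine
-- index computed with modular arithmetic (objective: simpler).

-- ===== PORT A =====
-- the while loop: i increases by exactly 1 per iteration from 0, so it runs
-- entries.toNat times; fuel counts the remaining iterations.
-- pyGetD/pySetD are exact for the in-range indices guaranteed by Pre_.
def bfLoop (rounds : Int) : Nat → Int → List (List Int) → Int → Bool → List (List Int)
  | 0, _, brackets, _, _ => brackets
  | fuel+1, i, brackets, bracket_index, count_up =>
    let i := i + 1
    if count_up then
      let current_bracket := PySem.List.pyGetD brackets bracket_index []
      let current_bracket := current_bracket ++ [i]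
      let brackets := PySem.List.pySetD brackets bracket_index current_bracket
      let count_up := if bracket_index = rounds - 1 then false else count_up
      bfLoop rounds fuel i brackets (bracket_index + 1) count_up
    else
      let bracket_index := bracket_index - 1
      let current_bracket := PySem.List.pyGetD brackets bracket_index []
      let current_bracket := current_bracket ++ [i]
      let brackets := PySem.List.pySetD brackets bracket_index current_bracket
      let count_up := if bracket_index = 0 then true else count_up
      bfLoop rounds fuel i brackets bracket_index count_up

def bracket_formula (entries : Int) (rounds : Int) : List (List Int) :=
  let brackets := (PySem.List.pyRange 0 rounds 1).foldl (fun bs _ => bs ++ [([] : List Int)]) []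
  bfLoop rounds entries.toNat 0 brackets 0 true

-- ===== PORT B =====
def altStep (rounds period : Int) (bs : List (List Int)) (i : Int) : List (List Int) :=
  let p := PySem.Int.mod (i - 1) period
  let idx := if p < rounds then p else period - 1 - p
  PySem.List.pySetD bs idx (PySem.List.pyGetD bs idx [] ++ [i])

def bracket_formula_alt (entries : Int) (rounds : Int) : List (List Int) :=
  (PySem.List.pyRange 1 (entries + 1) 1).foldl (altStep rounds (2 * rounds))
    (List.replicate rounds.toNat ([] : List Int))

-- ===== PRECONDITION & SPEC =====
-- A raises IndexError when entries > 0 and rounds ≤ 0 (it indexes into an empty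
-- bracket list); exactly those inputs are excluded.
def Pre_bracket_formula (entries : Int) (rounds : Int) : Prop := entries ≤ 0 ∨ 1 ≤ rounds
instance (entries : Int) (rounds : Int) : Decidable (Pre_bracket_formula entries rounds) := by unfold Pre_bracket_formula; infer_instance
def pvWitness_bracket_formula : Int × Int := (10, 3)

def Spec_bracket_formula (entries : Int) (rounds : Int) (out : List (List Int)) : Prop := out = bracket_formula_alt entries rounds
instance (entries : Int) (rounds : Int) (out : List (List Int)) : Decidable (Spec_bracket_formula entries rounds out) := by unfold Spec_bracket_formula; infer_instance

-- ===== CLAIM (what is proved, stated in full; the proofs are below) =====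
def Claim_equal_bracket_formula : Prop := ∀ (entries : Int) (rounds : Int), Dom_bracket_formula entries rounds → Pre_bracket_formula entries rounds → Spec_bracket_formula entries rounds (bracket_formula entries rounds)

-- ===== LEMMAS AND PROOFS =====

-- A's initialization loop builds rounds.toNat empty brackets.
lemma foldl_const_append {α β : Type} (x : α) (l : List β) (acc : List α) :
    l.foldl (fun bs _ => bs ++ [x]) acc = acc ++ List.replicate l.length x := by
  induction l generalizing acc with
  | nil => simp
  | cons h t ih => simp [ih, List.replicate_succ]

lemma init_eq (rounds : Int) :
    (PySem.List.pyRange 0 rounds 1).foldl (fun bs _ => bs ++ [([] : List Int)]) []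
      = List.replicate rounds.toNat ([] : List Int) := by
  rw [foldl_const_append, PySem.List.length_pyRange_one]
  simp

-- the serpentine state after i appends, as a function of i % (2*rounds)
def stIdx (r i : Int) : Int :=
  let p := PySem.Int.mod i (2 * r)
  if p < r then p else 2 * r - p
def stUp (r i : Int) : Bool := decide (PySem.Int.mod i (2 * r) < r)

-- one A-iteration from the invariant state is one B-step, and re-establishes the invariant
lemma loop_eq (r : Int) (hr : 1 ≤ r) (fuel : Nat) :
    ∀ (i : Int) (bs : List (List Int)), 0 ≤ i →
      bfLoop r fuel i bs (stIdx r i) (stUp r i)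
        = (PySem.List.pyRange (i + 1) (i + 1 + fuel) 1).foldl (altStep r (2 * r)) bs := by
  induction fuel with
  | zero =>
    intro i bs hi
    rw [PySem.List.pyRange_one_eq_nil (by push_cast; omega : i + 1 + ((0:Nat):Int) ≤ i + 1)]
    rfl
  | succ fuel ih =>
    intro i bs hi
    have h2r : (0:Int) < 2 * r := by omega
    have hm : PySem.Int.mod i (2 * r) = i % (2 * r) := PySem.Int.mod_eq_emod_of_pos h2r
    have hm2 : PySem.Int.mod (i + 1) (2 * r) = (i + 1) % (2 * r) := PySem.Int.mod_eq_emod_of_pos h2r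
    have hii : i + 1 - 1 = i := by ring
    have hp0 : 0 ≤ i % (2 * r) := Int.emod_nonneg _ (by omega)
    have hp2 : i % (2 * r) < 2 * r := Int.emod_lt_of_pos _ h2r
    have hq : (i + 1) % (2 * r) = if i % (2 * r) = 2 * r - 1 then 0 else i % (2 * r) + 1 := by
      have h1n : (1 : Int) % (2 * r) = 1 := Int.emod_eq_of_lt (by omega) (by omega)
      rw [Int.add_emod, h1n]
      split_ifs with h
      · rw [h, show 2 * r - 1 + 1 = 2 * r by ring, Int.emod_self]
      · exact Int.emod_eq_of_lt (by omega) (by omega)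
    rw [show (i + 1 + ((fuel + 1 : Nat) : Int)) = (i + 1) + 1 + (fuel : Int) by push_cast; ring]
    rw [PySem.List.pyRange_one_cons (by omega), List.foldl_cons,
      ← ih (i + 1) _ (by omega)]
    by_cases h : i % (2 * r) < r
    · have hst : stIdx r i = i % (2 * r) := by simp [stIdx, hm, h]
      have hup : stUp r i = true := by simp [stUp, hm, h]
      have e1 : altStep r (2 * r) bs (i + 1)
          = PySem.List.pySetD bs (i % (2 * r)) (PySem.List.pyGetD bs (i % (2 * r)) [] ++ [i + 1]) := by
        simp [altStep, hii, hm, h]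
      have e2 : stIdx r (i + 1) = i % (2 * r) + 1 := by
        simp only [stIdx, hm2, hq]
        split_ifs <;> omega
      have e3 : stUp r (i + 1) = (if i % (2 * r) = r - 1 then false else true) := by
        simp only [stUp, hm2, hq]
        split_ifs <;> simp <;> omega
      rw [hst, hup, e1, e2, e3]
      simp [bfLoop]
    · have hst : stIdx r i = 2 * r - i % (2 * r) := by simp [stIdx, hm, h]
      have hup : stUp r i = false := by simp [stUp, hm, h]
      have e1 : altStep r (2 * r) bs (i + 1)
          = PySem.List.pySetD bs (2 * r - i % (2 * r) - 1)
              (PySem.List.pyGetD bs (2 * r - i % (2 * r) - 1) [] ++ [i + 1]) := by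
        simp only [altStep, hii, hm, if_neg h]
        rw [show 2 * r - 1 - i % (2 * r) = 2 * r - i % (2 * r) - 1 by ring]
      have e2 : stIdx r (i + 1) = 2 * r - i % (2 * r) - 1 := by
        simp only [stIdx, hm2, hq]
        split_ifs <;> omega
      have e3 : stUp r (i + 1) = (if 2 * r - i % (2 * r) - 1 = 0 then true else false) := by
        simp only [stUp, hm2, hq]
        split_ifs <;> simp <;> omega
      rw [hst, hup, e1, e2, e3]
      simp [bfLoop]

-- ===== VERDICT (by name: the statement is the Claim_ definition above) =====
theorem bracket_formula_spec : Claim_equal_bracket_formula := by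
  intro entries rounds _ hpre
  unfold Spec_bracket_formula bracket_formula bracket_formula_alt
  by_cases he : entries ≤ 0
  · have h1 : entries.toNat = 0 := by omega
    have h2 : PySem.List.pyRange 1 (entries + 1) 1 = [] := PySem.List.pyRange_one_eq_nil (by omega)
    simp [h1, h2, bfLoop]
  · have hr : 1 ≤ rounds := hpre.resolve_left he
    have hcast : (0 : Int) + 1 + (entries.toNat : Int) = entries + 1 := by omega
    have h0 : stIdx rounds 0 = 0 := by
      simp [stIdx, PySem.Int.mod_eq_emod_of_pos (by omega : (0:Int) < 2 * rounds)]
      omega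
    have h0' : stUp rounds 0 = true := by
      simp [stUp, PySem.Int.mod_eq_emod_of_pos (by omega : (0:Int) < 2 * rounds)]
      omega
    rw [init_eq]
    calc bfLoop rounds entries.toNat 0 (List.replicate rounds.toNat []) 0 true
        = bfLoop rounds entries.toNat 0 (List.replicate rounds.toNat [])
            (stIdx rounds 0) (stUp rounds 0) := by rw [h0, h0']
      _ = (PySem.List.pyRange (0 + 1) (0 + 1 + entries.toNat) 1).foldl
            (altStep rounds (2 * rounds)) (List.replicate rounds.toNat []) :=
          loop_eq rounds hr entries.toNat 0 _ le_rfl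
      _ = (PySem.List.pyRange 1 (entries + 1) 1).foldl
            (altStep rounds (2 * rounds)) (List.replicate rounds.toNat []) := by
          rw [hcast]
          norm_num
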